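-- pv_equiv track=rewrite | github.com/TensorFlipFlop/OpenChipFlow | cocotb_ex/tools/extract_log_excerpt.py | merge_indices
-- ===== SOURCE A (Python) =====
-- from typing import List, Set, Tuple
--
-- def merge_indices(indices: Set[int]) -> List[Tuple[int, int]]:
--     """Convert a set of indices into sorted, contiguous ranges."""
--     if not indices:
--         return []
--
--     sorted_idx = sorted(list(indices))
--     ranges = []
--
--     if not sorted_idx:
--         return []
--
--     range_start = sorted_idx[0]
--     current = sorted_idx[0]
--
--     for idx in sorted_idx[1:]:
--         if idx == current + 1:
--             current = idx
--         else:
--             ranges.append((range_start, current))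
--             range_start = idx
--             current = idx
--     ranges.append((range_start, current))
--
--     return ranges
-- ===== SOURCE B (Python) =====
-- def merge_indices(indices):
--     """Convert a set of indices into sorted, contiguous ranges.
--
--     Boundary-detection algorithm: an index x starts a run iff x-1 is not in
--     the set, and ends a run iff x+1 is not in the set.  Collect the run
--     starts and run ends (each in ascending order); since starts and ends
--     alternate along the sorted axis, zipping them pairs each start with the
--     end of its own run.  No adjacency scan, no mutable range state.
--     """
--     s = set(indices)
--     xs = sorted(s)
--     starts = [x for x in xs if x - 1 not in s]
--     ends = [x for x in xs if x + 1 not in s]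
--     return list(zip(starts, ends))
-- ===== Notes on version B (the rewrite author's own statement) =====
-- stated objective: alternative
-- what changed: Replaces A's sorted adjacency scan with mutable (range_start, current) state by set-membership boundary detection: run starts are the x with x-1 not in the set, run ends the x with x+1 not in the set, and zipping the two ascending lists yields the ranges.
import Mathlib
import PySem

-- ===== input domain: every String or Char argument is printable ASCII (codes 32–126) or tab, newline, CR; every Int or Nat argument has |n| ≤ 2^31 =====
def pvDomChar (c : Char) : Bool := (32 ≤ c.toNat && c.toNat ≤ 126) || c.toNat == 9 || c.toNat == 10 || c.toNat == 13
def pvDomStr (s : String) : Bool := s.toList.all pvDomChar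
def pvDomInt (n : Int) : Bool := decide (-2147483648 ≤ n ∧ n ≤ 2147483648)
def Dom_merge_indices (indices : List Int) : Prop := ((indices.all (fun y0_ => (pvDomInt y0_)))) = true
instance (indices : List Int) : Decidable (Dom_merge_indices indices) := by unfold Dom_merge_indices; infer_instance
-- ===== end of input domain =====

-- B replaces A's sorted adjacency scan (mutable range_start/current state) by set-membership
-- boundary detection: run starts are the x with x-1 ∉ s, run ends the x with x+1 ∉ s, zipped.

-- ===== PORT A =====
-- the for-loop of A over sorted_idx[1:] with state (ranges, range_start, current)
def mergeLoopA (ranges : List (Int × Int)) (range_start current : Int) : List Int → List (Int × Int)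
  | [] => ranges ++ [(range_start, current)]
  | idx :: rest =>
    if idx = current + 1 then
      mergeLoopA ranges range_start idx rest
    else
      mergeLoopA (ranges ++ [(range_start, current)]) idx idx rest

def merge_indices (indices : List Int) : List (Int × Int) :=
  if indices = [] then []
  else
    match PySem.List.sorted indices (fun x => x) false with
    | [] => []   -- 'if not sorted_idx: return []'
    | h :: t => mergeLoopA [] h h t

-- ===== PORT B =====
def merge_indices_alt (indices : List Int) : List (Int × Int) :=
  let s : PySem.Set Int := PySem.Set.ofList indices
  let xs := PySem.List.sorted s (fun x => x) false
  let starts := xs.filter (fun x => !(PySem.Set.contains s (x - 1)))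
  let ends := xs.filter (fun x => !(PySem.Set.contains s (x + 1)))
  starts.zip ends

-- ===== PRECONDITION & SPEC =====
-- A's parameter is a Python set of ints; a list with duplicate elements does not encode a set
-- (on such lists the two ports legitimately differ), so Pre_ admits exactly the duplicate-free lists.
def Pre_merge_indices (indices : List Int) : Prop := indices.Nodup
instance (indices : List Int) : Decidable (Pre_merge_indices indices) := by unfold Pre_merge_indices; infer_instance
def pvWitness_merge_indices : List Int := [5, 1, 2, 3, 9, 10]

def Spec_merge_indices (indices : List Int) (out : List (Int × Int)) : Prop := out = merge_indices_alt indices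
instance (indices : List Int) (out : List (Int × Int)) : Decidable (Spec_merge_indices indices out) := by unfold Spec_merge_indices; infer_instance

-- ===== CLAIM (what is proved, stated in full; the proofs are below) =====
def Claim_equal_merge_indices : Prop := ∀ (indices : List Int), Dom_merge_indices indices → Pre_merge_indices indices → Spec_merge_indices indices (merge_indices indices)

-- ===== LEMMAS AND PROOFS =====

-- reference run decomposition of a sorted list, computed by structural recursion
def runsF : List Int → List (Int × Int)
  | [] => []
  | v :: t =>
    match runsF t with
    | (a, b) :: rest => if a = v + 1 then (v, b) :: rest else (v, v) :: (a, b) :: rest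
    | [] => [(v, v)]

theorem runsF_cons (v : Int) (t : List Int) : ∃ c gs, runsF (v :: t) = (v, c) :: gs := by
  cases h : runsF t with
  | nil => exact ⟨v, [], by simp [runsF, h]⟩
  | cons p rest =>
    obtain ⟨a, b⟩ := p
    by_cases hv : a = v + 1
    · exact ⟨b, rest, by simp [runsF, h, hv]⟩
    · exact ⟨v, (a, b) :: rest, by simp [runsF, h, hv]⟩

theorem runsF_cons_eq (v : Int) (t : List Int) :
    runsF (v :: t) = (match runsF t with
      | (a, b) :: rest => if a = v + 1 then (v, b) :: rest else (v, v) :: (a, b) :: rest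
      | [] => [(v, v)]) := rfl

theorem loopA_eq : ∀ (t : List Int) (cur rs : Int) (ranges : List (Int × Int)) (c : Int)
    (gs : List (Int × Int)), runsF (cur :: t) = (cur, c) :: gs →
    mergeLoopA ranges rs cur t = ranges ++ (rs, c) :: gs := by
  intro t
  induction t with
  | nil =>
    intro cur rs ranges c gs h
    simp [runsF] at h
    obtain ⟨hc, hgs⟩ := h
    simp [mergeLoopA, ← hc, hgs]
  | cons idx t' ih =>
    intro cur rs ranges c gs h
    obtain ⟨c', gs', h'⟩ := runsF_cons idx t'
    rw [runsF_cons_eq, h'] at h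
    by_cases hv : idx = cur + 1
    · obtain ⟨hc, hgs⟩ : c' = c ∧ gs' = gs := by
        rw [show (match (idx, c') :: gs' with
              | (a, b) :: rest => if a = cur + 1 then (cur, b) :: rest else (cur, cur) :: (a, b) :: rest
              | [] => [(cur, cur)]) = if idx = cur + 1 then (cur, c') :: gs' else (cur, cur) :: (idx, c') :: gs' from rfl,
            if_pos hv] at h
        simpa using h
      rw [mergeLoopA, if_pos hv, ih idx rs ranges c gs (by rw [h', hc, hgs])]
    · obtain ⟨hc, hgs⟩ : cur = c ∧ (idx, c') :: gs' = gs := by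
        rw [show (match (idx, c') :: gs' with
              | (a, b) :: rest => if a = cur + 1 then (cur, b) :: rest else (cur, cur) :: (a, b) :: rest
              | [] => [(cur, cur)]) = if idx = cur + 1 then (cur, c') :: gs' else (cur, cur) :: (idx, c') :: gs' from rfl,
            if_neg hv] at h
        simpa using h
      rw [mergeLoopA, if_neg hv, ih idx idx (ranges ++ [(rs, cur)]) c' gs' h']
      simp [← hc, ← hgs]

-- A's whole function computes runsF of the sorted list
theorem A_eq_runsF (indices : List Int) :
    merge_indices indices = runsF (PySem.List.sorted indices (fun x => x) false) := by
  unfold merge_indices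
  by_cases hnil : indices = []
  · subst hnil; rfl
  · rw [if_neg hnil]
    cases h : PySem.List.sorted indices (fun x => x) false with
    | nil => simp [runsF]
    | cons hd t =>
      obtain ⟨c, gs, hr⟩ := runsF_cons hd t
      show mergeLoopA [] hd hd t = runsF (hd :: t)
      rw [loopA_eq t hd hd [] c gs hr, hr]
      simp

-- core: on a strictly increasing list, zipping the boundary filters yields the runs
theorem zip_filter_eq_runsF : ∀ t : List Int, t.Pairwise (· < ·) →
    (t.filter (fun x => !(decide ((x - 1) ∈ t)))).zip
      (t.filter (fun x => !(decide ((x + 1) ∈ t)))) = runsF t := by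
  intro t
  induction t with
  | nil => intro _; rfl
  | cons v rest ih =>
    intro hp
    rw [List.pairwise_cons] at hp
    obtain ⟨hv, hrest⟩ := hp
    have hstart_v : (v - 1) ∉ (v :: rest) := by
      intro h
      rcases List.mem_cons.1 h with h | h
      · omega
      · exact absurd (hv _ h) (by omega)
    by_cases hin : (v + 1) ∈ rest
    · -- rest starts with v+1
      cases rest with
      | nil => simp at hin
      | cons h r' =>
        rw [List.pairwise_cons] at hrest
        obtain ⟨hh, hr'⟩ := hrest
        have hhv : v < h := hv _ (List.mem_cons_self)
        have hhead : h = v + 1 := by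
          rcases List.mem_cons.1 hin with he | he
          · omega
          · exact absurd (hh _ he) (by omega)
        subst hhead
        -- starts of (v :: rest) = v :: (filter over r' with predicate wrt rest)
        have hstarts :
            ((v :: (v+1) :: r').filter (fun x => !(decide ((x - 1) ∈ (v :: (v+1) :: r'))))) =
              v :: (r'.filter (fun x => !(decide ((x - 1) ∈ ((v+1) :: r'))))) := by
          rw [List.filter_cons, List.filter_cons]
          have h1 : (!(decide ((v - 1) ∈ (v :: (v+1) :: r')))) = true := by
            simp only [Bool.not_eq_true', decide_eq_false_iff_not]; exact hstart_v
          have h2 : (!(decide ((v + 1 - 1) ∈ (v :: (v+1) :: r')))) = false := by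
            simp
          rw [if_pos h1, if_neg (by simp)]
          congr 1
          apply List.filter_congr
          intro x hx
          have hx2 : v + 1 < x := hh _ hx
          have : ((x - 1) ∈ (v :: (v+1) :: r')) ↔ ((x - 1) ∈ ((v+1) :: r')) := by
            simp only [List.mem_cons]
            constructor
            · rintro (h | h) <;> [omega; exact h]
            · intro h; right; exact h
          simp [this]
        have hstarts_rest :
            (((v+1) :: r').filter (fun x => !(decide ((x - 1) ∈ ((v+1) :: r'))))) =
              (v + 1) :: (r'.filter (fun x => !(decide ((x - 1) ∈ ((v+1) :: r'))))) := by
          rw [List.filter_cons]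
          have h1 : (!(decide ((v + 1 - 1) ∈ ((v+1) :: r')))) = true := by
            simp only [Bool.not_eq_true', decide_eq_false_iff_not]
            intro h
            rcases List.mem_cons.1 h with h | h
            · omega
            · exact absurd (hh _ h) (by omega)
          rw [if_pos h1]
        have hends :
            ((v :: (v+1) :: r').filter (fun x => !(decide ((x + 1) ∈ (v :: (v+1) :: r'))))) =
              (((v+1) :: r').filter (fun x => !(decide ((x + 1) ∈ ((v+1) :: r'))))) := by
          rw [List.filter_cons]
          have h1 : (!(decide ((v + 1) ∈ (v :: (v+1) :: r')))) = false := by simp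
          rw [if_neg (by simp)]
          apply List.filter_congr
          intro x hx
          have hx2 : v < x := hv _ hx
          have : ((x + 1) ∈ (v :: (v+1) :: r')) ↔ ((x + 1) ∈ ((v+1) :: r')) := by
            simp only [List.mem_cons]
            constructor
            · rintro (h | h) <;> [omega; exact h]
            · intro h; right; exact h
          simp [this]
        have hihr := ih (by rw [List.pairwise_cons]; exact ⟨hh, hr'⟩)
        obtain ⟨c, gs, hr⟩ := runsF_cons (v + 1) r'
        rw [hstarts_rest] at hihr
        rw [hr] at hihr
        -- ends of rest must be nonempty; destruct it
        cases hE : (((v+1) :: r').filter (fun x => !(decide ((x + 1) ∈ ((v+1) :: r'))))) with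
        | nil => rw [hE] at hihr; simp at hihr
        | cons e E' =>
          rw [hE] at hihr
          rw [List.zip_cons_cons] at hihr
          have hec : e = c ∧ (r'.filter (fun x => !(decide ((x - 1) ∈ ((v+1) :: r'))))).zip E' = gs := by
            constructor
            · have := congrArg (fun l => l.headD ((0:Int),(0:Int))) hihr
              simpa using this
            · have := congrArg List.tail hihr
              simpa using this
          rw [hstarts, hends, hE, List.zip_cons_cons, hec.1, hec.2]
          rw [runsF_cons_eq (v := v), hr]
          simp
    · -- v+1 not in rest: v is a singleton boundary on both sides
      have hstarts :
          ((v :: rest).filter (fun x => !(decide ((x - 1) ∈ (v :: rest))))) =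
            v :: (rest.filter (fun x => !(decide ((x - 1) ∈ rest)))) := by
        rw [List.filter_cons]
        have h1 : (!(decide ((v - 1) ∈ (v :: rest)))) = true := by
          simp only [Bool.not_eq_true', decide_eq_false_iff_not]; exact hstart_v
        rw [if_pos h1]
        congr 1
        apply List.filter_congr
        intro x hx
        have hx2 : v < x := hv _ hx
        have hxne : x ≠ v + 1 := by intro h; rw [h] at hx; exact hin hx
        have : ((x - 1) ∈ (v :: rest)) ↔ ((x - 1) ∈ rest) := by
          simp only [List.mem_cons]
          constructor
          · rintro (h | h) <;> [omega; exact h]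
          · intro h; right; exact h
        simp [this]
      have hends :
          ((v :: rest).filter (fun x => !(decide ((x + 1) ∈ (v :: rest))))) =
            v :: (rest.filter (fun x => !(decide ((x + 1) ∈ rest)))) := by
        rw [List.filter_cons]
        have h1 : (!(decide ((v + 1) ∈ (v :: rest)))) = true := by
          simp only [Bool.not_eq_true', decide_eq_false_iff_not]
          intro h
          rcases List.mem_cons.1 h with h | h
          · omega
          · exact hin h
        rw [if_pos h1]
        congr 1
        apply List.filter_congr
        intro x hx
        have hx2 : v < x := hv _ hx
        have : ((x + 1) ∈ (v :: rest)) ↔ ((x + 1) ∈ rest) := by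
          simp only [List.mem_cons]
          constructor
          · rintro (h | h) <;> [omega; exact h]
          · intro h; right; exact h
        simp [this]
      rw [hstarts, hends, List.zip_cons_cons, ih hrest]
      cases hrst : rest with
      | nil => simp [runsF]
      | cons h r' =>
        obtain ⟨c, gs, hr⟩ := runsF_cons h r'
        have hne : h ≠ v + 1 := by
          intro he; rw [he] at hrst; exact hin (hrst ▸ List.mem_cons_self)
        rw [hr, runsF_cons_eq (v := v), hr]
        simp [hne]

-- ===== VERDICT (by name: the statement is the Claim_ definition above) =====
theorem merge_indices_spec : Claim_equal_merge_indices := by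
  intro indices _ hpre
  unfold Spec_merge_indices merge_indices_alt
  rw [A_eq_runsF]
  have hnd : indices.Nodup := hpre
  have hself : PySem.Set.ofList indices = indices := PySem.Set.ofList_eq_self_of_nodup indices hnd
  have hsorted : (PySem.List.sorted indices (fun x => x) false).Pairwise (· < ·) := by
    have := PySem.List.sorted_ofList_pairwise_lt (xs := indices)
    rwa [hself] at this
  simp only [hself]
  set t := PySem.List.sorted indices (fun x => x) false with ht
  have hcont : ∀ y : Int, PySem.Set.contains indices y = decide (y ∈ t) := by
    intro y
    by_cases h : y ∈ t
    · have hy : y ∈ indices := (PySem.List.mem_sorted indices (fun x => x) false y).1 h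
      simp [h]
      exact hy
    · have hy : y ∉ indices := fun hy => h ((PySem.List.mem_sorted indices (fun x => x) false y).2 hy)
      simp [h]
      exact hy
  simp only [hcont]
  exact (zip_filter_eq_runsF t hsorted).symm
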